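-- pv_equiv track=rewrite | github.com/expectedparrot/bewley | src/bewley/cli.py | byte_to_line_range
-- ===== SOURCE A (Python) =====
-- def line_offsets(text: str) -> list[int]:
--     starts = [0]
--     running = 0
--     for line in text.splitlines(keepends=True):
--         running += len(line.encode("utf-8"))
--         starts.append(running)
--     return starts
--
-- def byte_to_line_range(text: str, start_byte: int, end_byte: int) -> tuple[int, int]:
--     starts = line_offsets(text)
--     start_line = 1
--     end_line = 1
--     for idx, offset in enumerate(starts[:-1], start=1):
--         next_offset = starts[idx]
--         if offset <= start_byte < next_offset:
--             start_line = idx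
--         if offset < end_byte <= next_offset:
--             end_line = idx
--             break
--         if end_byte == offset and idx > 1:
--             end_line = idx - 1
--     else:
--         if starts:
--             end_line = max(1, len(starts) - 1)
--     return start_line, max(start_line, end_line)
-- ===== SOURCE B (Python) =====
-- def byte_to_line_range(text, start_byte, end_byte):
--     total = len(text.encode("utf-8"))
--     lines = text.splitlines(keepends=True)
--     if 0 <= start_byte < total:
--         start_line = len(text[:start_byte + 1].splitlines(keepends=True))
--     else:
--         start_line = 1
--     if 0 < end_byte <= total:
--         end_line = len(text[:end_byte].splitlines(keepends=True))
--     else: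
--         end_line = max(1, len(lines))
--     return start_line, max(start_line, end_line)
-- ===== Notes on version B (the rewrite author's own statement) =====
-- stated objective: simpler
-- what changed: Replaces the offsets list plus the enumerate/break/for-else scan by two direct closed-form line lookups: each endpoint's line number is simply the number of lines of the corresponding text prefix, with out-of-range endpoints defaulted exactly as A defaults them.
-- intended difference: On inverted in-range byte ranges where start_byte lies on a strictly later line than end_byte-1, A's early break leaves start_line at its default so A returns (1, end_line), while B returns (start_line, start_line) — the actual line of start_byte, which is the intended value for the byte-to-line mapping. — e.g. on byte_to_line_range("a\nb", 2, 1): A returns (1, 1), B returns (2, 2)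
import Mathlib
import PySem

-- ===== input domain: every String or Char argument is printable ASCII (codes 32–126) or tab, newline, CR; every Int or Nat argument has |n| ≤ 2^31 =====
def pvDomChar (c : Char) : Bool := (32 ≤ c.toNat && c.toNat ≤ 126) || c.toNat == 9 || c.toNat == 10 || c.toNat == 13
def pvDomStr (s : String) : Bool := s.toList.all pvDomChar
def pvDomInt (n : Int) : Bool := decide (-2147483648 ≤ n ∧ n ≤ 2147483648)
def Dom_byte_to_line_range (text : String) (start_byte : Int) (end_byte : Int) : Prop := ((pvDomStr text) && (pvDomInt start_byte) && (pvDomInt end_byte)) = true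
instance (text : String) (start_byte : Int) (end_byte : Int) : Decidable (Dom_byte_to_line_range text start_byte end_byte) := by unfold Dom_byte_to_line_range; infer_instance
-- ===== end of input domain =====

-- B replaces A's offsets list and enumerate/break/for-else scan by two closed-form prefix
-- line counts (objective: simpler); on inverted in-range byte ranges (D_ below) A's early
-- break leaves start_line at 1 while B reports start_byte's actual line.

-- ===== PORT A =====
-- shared port of the builtin str.splitlines(keepends=True): exact on Dom, where the only
-- line boundaries are '\n', '\r' and '\r\n' (Python's other boundary chars lie outside Dom)
def splitlinesKeep : List Char → List (List Char)
  | [] => []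
  | '\r' :: '\n' :: rest => ['\r', '\n'] :: splitlinesKeep rest
  | '\r' :: rest => ['\r'] :: splitlinesKeep rest
  | '\n' :: rest => ['\n'] :: splitlinesKeep rest
  | c :: rest =>
    match splitlinesKeep rest with
    | [] => [[c]]
    | l :: ls => (c :: l) :: ls

-- len(line.encode("utf-8")) = line.length on Dom (every Dom char is one UTF-8 byte)
def line_offsets (text : String) : List Int :=
  ((splitlinesKeep text.toList).foldl
    (fun (p : List Int × Int) line =>
      let running := p.2 + (line.length : Int)
      (p.1 ++ [running], running)) ([0], 0)).1

-- the for-loop of A: state (idx, start_line, end_line); result (start_line, end_line, broke)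
def aLoop (sb eb : Int) : List (Int × Int) → Int → Int → Int → Int × Int × Bool
  | [], _, s, e => (s, e, false)
  | (offset, nxt) :: rest, idx, s, e =>
    if offset < eb ∧ eb ≤ nxt then ((if offset ≤ sb ∧ sb < nxt then idx else s), idx, true)
    else aLoop sb eb rest (idx + 1) (if offset ≤ sb ∧ sb < nxt then idx else s)
      (if eb = offset ∧ 1 < idx then idx - 1 else e)

def byte_to_line_range (text : String) (start_byte : Int) (end_byte : Int) : Int × Int :=
  let starts := line_offsets text
  -- enumerate(starts[:-1], start=1) with next_offset = starts[idx]: starts[:-1] zipped with starts[1:]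
  let pairs := (PySem.List.slice starts none (some (-1))).zip starts.tail
  let r := aLoop start_byte end_byte pairs 1 1 1
  let e := if r.2.2 = true then r.2.1
           else if starts = [] then r.2.1 else max 1 ((starts.length : Int) - 1)
  (r.1, max r.1 e)

-- ===== PORT B =====
def byte_to_line_range_alt (text : String) (start_byte : Int) (end_byte : Int) : Int × Int :=
  let cs := text.toList
  let total : Int := (cs.length : Int)          -- len(text.encode("utf-8")) on Dom
  let lines := splitlinesKeep cs
  let start_line : Int :=
    if 0 ≤ start_byte ∧ start_byte < total then
      ((splitlinesKeep (PySem.List.slice cs none (some (start_byte + 1)))).length : Int)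
    else 1
  let end_line : Int :=
    if 0 < end_byte ∧ end_byte ≤ total then
      ((splitlinesKeep (PySem.List.slice cs none (some end_byte))).length : Int)
    else max 1 (lines.length : Int)
  (start_line, max start_line end_line)

-- ===== PRECONDITION & SPEC =====
-- On inverted in-range byte ranges where start_byte lies on a strictly later line than
-- end_byte-1 (some line ends at a position j with end_byte-1 <= j < start_byte), A's early
-- break leaves start_line at its default so A returns (1, end_line), while B returns
-- (start_line, start_line) — the actual line of start_byte, the intended value.
def D_byte_to_line_range (text : String) (start_byte : Int) (end_byte : Int) : Prop :=
  0 ≤ start_byte ∧ start_byte < (text.toList.length : Int) ∧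
  0 < end_byte ∧ end_byte ≤ (text.toList.length : Int) ∧
  ∃ j < start_byte.toNat, end_byte - 1 ≤ (j : Int) ∧
    (text.toList[j]? = some '\n' ∨ (text.toList[j]? = some '\r' ∧ text.toList[j + 1]? ≠ some '\n'))
instance (text : String) (start_byte : Int) (end_byte : Int) : Decidable (D_byte_to_line_range text start_byte end_byte) := by unfold D_byte_to_line_range; infer_instance

def Spec_byte_to_line_range (text : String) (start_byte : Int) (end_byte : Int) (out : Int × Int) : Prop := ¬ D_byte_to_line_range text start_byte end_byte → out = byte_to_line_range_alt text start_byte end_byte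
instance (text : String) (start_byte : Int) (end_byte : Int) (out : Int × Int) : Decidable (Spec_byte_to_line_range text start_byte end_byte out) := by unfold Spec_byte_to_line_range; infer_instance

def pvDiffWitness_byte_to_line_range : String × Int × Int := ("a\nb", 2, 1)
def pvDiffWitnessOut_byte_to_line_range : (Int × Int) × (Int × Int) := ((1, 1), (2, 2))

-- ===== CLAIM (what is proved, stated in full; the proofs are below) =====
def Claim_unchanged_byte_to_line_range : Prop := ∀ (text : String) (start_byte : Int) (end_byte : Int), Dom_byte_to_line_range text start_byte end_byte → Spec_byte_to_line_range text start_byte end_byte (byte_to_line_range text start_byte end_byte)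
def Claim_changed_byte_to_line_range : Prop := Dom_byte_to_line_range (pvDiffWitness_byte_to_line_range.1) (pvDiffWitness_byte_to_line_range.2.1) (pvDiffWitness_byte_to_line_range.2.2) ∧ D_byte_to_line_range (pvDiffWitness_byte_to_line_range.1) (pvDiffWitness_byte_to_line_range.2.1) (pvDiffWitness_byte_to_line_range.2.2) ∧ byte_to_line_range (pvDiffWitness_byte_to_line_range.1) (pvDiffWitness_byte_to_line_range.2.1) (pvDiffWitness_byte_to_line_range.2.2) = pvDiffWitnessOut_byte_to_line_range.1 ∧ byte_to_line_range_alt (pvDiffWitness_byte_to_line_range.1) (pvDiffWitness_byte_to_line_range.2.1) (pvDiffWitness_byte_to_line_range.2.2) = pvDiffWitnessOut_byte_to_line_range.2 ∧ pvDiffWitnessOut_byte_to_line_range.1 ≠ pvDiffWitnessOut_byte_to_line_range.2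
def Claim_exact_byte_to_line_range : Prop := ∀ (text : String) (start_byte : Int) (end_byte : Int), Dom_byte_to_line_range text start_byte end_byte → D_byte_to_line_range text start_byte end_byte → byte_to_line_range text start_byte end_byte ≠ byte_to_line_range_alt text start_byte end_byte

-- ===== LEMMAS AND PROOFS =====

-- unfold equations of splitlinesKeep through the overlapping literal patterns
theorem slk_crlf (rest : List Char) : splitlinesKeep ('\r'::'\n'::rest) = ['\r','\n'] :: splitlinesKeep rest := rfl
theorem slk_lf (rest : List Char) : splitlinesKeep ('\n'::rest) = ['\n'] :: splitlinesKeep rest := rfl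
theorem slk_cr_of (r0 : Char) (rest : List Char) (h : r0 ≠ '\n') :
    splitlinesKeep ('\r'::r0::rest) = ['\r'] :: splitlinesKeep (r0::rest) := by
  rw [splitlinesKeep.eq_def]
  split
  case h_1 => simp_all
  case h_2 => rename_i heq; injection heq with h1 h2; injection h2 with h3 h4; exact absurd h3 h
  case h_3 => rename_i heq; injection heq with h1 h2; rw [h2]
  case h_4 => rename_i heq; injection heq with h1 h2; simp at h1
  case h_5 => rename_i hc1 hc2 hc3 heq; injection heq with h1 h2; exact absurd h1.symm (by simpa using hc2)
theorem slk_cr (rest : List Char) (h : ∀ r', rest ≠ '\n' :: r') :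
    splitlinesKeep ('\r'::rest) = ['\r'] :: splitlinesKeep rest := by
  rcases rest with _ | ⟨r0, rest'⟩
  · rfl
  · exact slk_cr_of r0 rest' (fun he => h rest' (by rw [he]))
theorem slk_other (c : Char) (rest : List Char) (hc : c ≠ '\r') (hn : c ≠ '\n') :
    splitlinesKeep (c::rest) = match splitlinesKeep rest with | [] => [[c]] | l :: ls => (c::l)::ls := by
  rw [splitlinesKeep.eq_def]
  split
  case h_1 => simp_all
  case h_2 => rename_i heq; injection heq with h1 h2; exact absurd h1 hc
  case h_3 => rename_i heq; injection heq with h1 h2; exact absurd h1 hc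
  case h_4 => rename_i heq; injection heq with h1 h2; exact absurd h1 hn
  case h_5 => rename_i heq; injection heq with h1 h2; rw [h1, h2]

theorem splitlinesKeep_eq_nil (cs : List Char) : splitlinesKeep cs = [] ↔ cs = [] := by
  induction cs using splitlinesKeep.induct with
  | case1 => simp [splitlinesKeep]
  | case2 rest ih => rw [slk_crlf]; simp
  | case3 rest h ih => rw [slk_cr rest (fun r' he => h r' he)]; simp
  | case4 rest ih => rw [slk_lf]; simp
  | case5 c rest h1 h2 h3 hnil ih =>
    rw [slk_other c rest (fun he => h2 he) (fun he => h3 he), hnil]; simp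
  | case6 c rest h1 h2 h3 l ls hcons ih =>
    rw [slk_other c rest (fun he => h2 he) (fun he => h3 he), hcons]; simp

theorem splitlinesKeep_mem_ne_nil (cs : List Char) : ∀ l ∈ splitlinesKeep cs, l ≠ [] := by
  induction cs using splitlinesKeep.induct with
  | case1 => simp [splitlinesKeep]
  | case2 rest ih => rw [slk_crlf]; simpa using ih
  | case3 rest h ih => rw [slk_cr rest (fun r' he => h r' he)]; simpa using ih
  | case4 rest ih => rw [slk_lf]; simpa using ih
  | case5 c rest h1 h2 h3 hnil ih =>
    rw [slk_other c rest (fun he => h2 he) (fun he => h3 he), hnil]; simp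
  | case6 c rest h1 h2 h3 l ls hcons ih =>
    rw [slk_other c rest (fun he => h2 he) (fun he => h3 he), hcons]
    intro x hx
    cases hx with
    | head => simp
    | tail _ hx => exact ih x (by rw [hcons]; exact List.mem_cons_of_mem _ hx)

theorem splitlinesKeep_flatten (cs : List Char) : (splitlinesKeep cs).flatten = cs := by
  induction cs using splitlinesKeep.induct with
  | case1 => simp [splitlinesKeep]
  | case2 rest ih => rw [slk_crlf]; simp [ih]
  | case3 rest h ih => rw [slk_cr rest (fun r' he => h r' he)]; simp [ih]
  | case4 rest ih => rw [slk_lf]; simp [ih]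
  | case5 c rest h1 h2 h3 hnil ih =>
    rw [slk_other c rest (fun he => h2 he) (fun he => h3 he), hnil]
    rw [hnil] at ih; simp at ih; simp [← ih]
  | case6 c rest h1 h2 h3 l ls hcons ih =>
    rw [slk_other c rest (fun he => h2 he) (fun he => h3 he), hcons]
    rw [hcons] at ih; simpa using congrArg (c :: ·) ih

def lineLens (cs : List Char) : List Nat := (splitlinesKeep cs).map List.length

theorem sum_lineLens (cs : List Char) : ((lineLens cs).sum : Int) = (cs.length : Int) := by
  have := congrArg List.length (splitlinesKeep_flatten cs)
  rw [List.length_flatten] at this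
  exact_mod_cast congrArg (Nat.cast (R := Int)) this

theorem lineLens_pos (cs : List Char) : ∀ a ∈ lineLens cs, 1 ≤ a := by
  intro a ha
  simp only [lineLens, List.mem_map] at ha
  obtain ⟨l, hl, rfl⟩ := ha
  have := splitlinesKeep_mem_ne_nil cs l hl
  exact List.length_pos_iff.mpr this

-- 1-based line of position b over the list of line lengths
def loc : List Nat → Int → Int
  | [], _ => 1
  | a :: L, b => if b < (a : Int) then 1 else 1 + loc L (b - a)

theorem loc_pos (L : List Nat) (b : Int) : 1 ≤ loc L b := by
  induction L generalizing b with
  | nil => simp [loc]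
  | cons a L ih =>
    simp only [loc]
    split_ifs
    · omega
    · have := ih (b - a); omega

def cums (o : Int) : List Nat → List Int
  | [] => []
  | a :: L => (o + (a : Int)) :: cums (o + (a : Int)) L

def mkpairs (o : Int) : List Nat → List (Int × Int)
  | [] => []
  | a :: L => (o, o + (a : Int)) :: mkpairs (o + (a : Int)) L

theorem cums_length (o : Int) (L : List Nat) : (cums o L).length = L.length := by
  induction L generalizing o with
  | nil => rfl
  | cons a L ih => simp [cums, ih]

theorem zip_dropLast_cums (L : List Nat) : ∀ (o : Int),
    ((o :: cums o L).dropLast).zip (cums o L) = mkpairs o L := by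
  induction L with
  | nil => intro o; simp [cums, mkpairs]
  | cons a L ih =>
    intro o
    simp only [cums, mkpairs]
    rw [List.dropLast_cons_of_ne_nil (by simp)]
    simp only [List.zip_cons_cons]
    exact congrArg _ (ih (o + a))

theorem foldl_offsets (ls : List (List Char)) : ∀ (acc : List Int) (run : Int),
    (ls.foldl (fun (p : List Int × Int) line =>
      (p.1 ++ [p.2 + (line.length : Int)], p.2 + (line.length : Int))) (acc, run))
      = (acc ++ cums run (ls.map List.length), run + ((ls.map List.length).sum : Int)) := by
  induction ls with
  | nil => intro acc run; simp [cums]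
  | cons l ls ih =>
    intro acc run
    simp only [List.foldl_cons, List.map_cons, List.sum_cons, cums]
    rw [ih]
    simp only [Prod.mk.injEq]
    refine ⟨by simp, by push_cast; ring⟩

theorem line_offsets_eq (text : String) :
    line_offsets text = 0 :: cums 0 (lineLens text.toList) := by
  simp only [line_offsets, lineLens]
  rw [show (fun (p : List Int × Int) line =>
      let running := p.2 + ((line : List Char).length : Int);
      (p.1 ++ [running], running)) = (fun (p : List Int × Int) line =>
      (p.1 ++ [p.2 + (line.length : Int)], p.2 + (line.length : Int))) from rfl]
  rw [foldl_offsets]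
  simp

theorem sum_pos_of_ne_nil (L : List Nat) (h1 : ∀ a ∈ L, 1 ≤ a) (h : L ≠ []) : 1 ≤ L.sum := by
  rcases L with _ | ⟨a, L⟩
  · exact absurd rfl h
  · have := h1 a (by simp); simp only [List.sum_cons]; omega

-- characterisation of A's loop over the consecutive-offset pairs
set_option maxHeartbeats 1000000 in
theorem aLoop_spec (sb eb : Int) (L : List Nat) :
    ∀ (o idx s e : Int), (∀ a ∈ L, 1 ≤ a) →
    aLoop sb eb (mkpairs o L) idx s e =
      if o < eb ∧ eb ≤ o + (L.sum : Int) then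
        ((if o ≤ sb ∧ sb < o + (L.sum : Int) ∧ loc L (sb - o) ≤ loc L (eb - 1 - o)
            then idx + loc L (sb - o) - 1 else s),
         idx + loc L (eb - 1 - o) - 1, true)
      else
        ((if o ≤ sb ∧ sb < o + (L.sum : Int) then idx + loc L (sb - o) - 1 else s),
         (if eb = o ∧ 1 < idx ∧ L ≠ [] then idx - 1 else e), false) := by
  induction L with
  | nil =>
    intro o idx s e _
    simp only [mkpairs, aLoop, List.sum_nil, Nat.cast_zero, add_zero, ne_eq,
      not_true_eq_false, and_false, if_false]
    split_ifs <;> first | rfl | (exfalso; omega)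
  | cons a L ih =>
    intro o idx s e hpos
    have ha : (1 : Int) ≤ (a : Int) := by exact_mod_cast hpos a (by simp)
    have hL : ∀ x ∈ L, 1 ≤ x := fun x hx => hpos x (List.mem_cons_of_mem _ hx)
    have hp1 : 1 ≤ loc L (sb - o - (a : Int)) := loc_pos L _
    have hq1 : 1 ≤ loc L (eb - 1 - o - (a : Int)) := loc_pos L _
    have hsum : ((a :: L).sum : Int) = (a : Int) + (L.sum : Int) := by
      push_cast [List.sum_cons]; ring
    simp only [mkpairs, aLoop]
    rw [ih (o + (a : Int)) (idx + 1) _ _ hL,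
        show sb - (o + (a : Int)) = sb - o - (a : Int) from by ring,
        show eb - 1 - (o + (a : Int)) = eb - 1 - o - (a : Int) from by ring, hsum]
    simp only [loc]
    rcases eq_or_ne L [] with hLnil | hLnil
    · subst hLnil
      have hz : ((([] : List Nat).sum : Int)) = 0 := by simp
      have hone : ((([a] : List Nat).sum : Int)) = (a : Int) := by simp
      have hb1 : loc ([] : List Nat) (sb - o - (a : Int)) = 1 := by simp [loc]
      have hb2 : loc ([] : List Nat) (eb - 1 - o - (a : Int)) = 1 := by simp [loc]
      simp only [loc, ne_eq, List.cons_ne_nil,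
        not_true_eq_false, and_false, if_false, not_false_eq_true, and_true]
      split_ifs <;> simp only [Prod.mk.injEq, true_and, and_true] <;>
        first | trivial | (constructor <;> first | trivial | omega) | omega
    · have hs1 : (1 : Int) ≤ (L.sum : Int) := by
        exact_mod_cast sum_pos_of_ne_nil L hL hLnil
      simp only [ne_eq, List.cons_ne_nil, not_false_eq_true, and_true, hLnil]
      split_ifs <;> simp only [Prod.mk.injEq, true_and, and_true] <;>
        first | trivial | (constructor <;> first | trivial | omega) | omega

-- helper unfold lemmas for loc and dLineOf
theorem loc_cons_lt (a : Nat) (L : List Nat) (b : Int) (h : b < (a : Int)) :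
    loc (a :: L) b = 1 := by simp [loc, h]
theorem loc_cons_ge (a : Nat) (L : List Nat) (b : Int) (h : ¬ b < (a : Int)) :
    loc (a :: L) b = 1 + loc L (b - a) := by simp [loc, h]

theorem lineLens_crlf (rest : List Char) : lineLens ('\r'::'\n'::rest) = 2 :: lineLens rest := by
  simp [lineLens, slk_crlf]
theorem lineLens_cr (rest : List Char) (h : ∀ r', rest ≠ '\n' :: r') :
    lineLens ('\r'::rest) = 1 :: lineLens rest := by
  simp [lineLens, slk_cr rest h]
theorem lineLens_lf (rest : List Char) : lineLens ('\n'::rest) = 1 :: lineLens rest := by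
  simp [lineLens, slk_lf]
theorem lineLens_other (c : Char) (rest : List Char) (hc : c ≠ '\r') (hn : c ≠ '\n')
    (l : List Char) (ls : List (List Char)) (hcons : splitlinesKeep rest = l :: ls) :
    lineLens (c::rest) = (l.length + 1) :: ls.map List.length := by
  simp [lineLens, slk_other c rest hc hn, hcons]
theorem lineLens_tail (rest : List Char) (l : List Char) (ls : List (List Char))
    (hcons : splitlinesKeep rest = l :: ls) :
    lineLens rest = l.length :: ls.map List.length := by
  simp [lineLens, hcons]

theorem take_head_ne (rest : List Char) (n : Nat) (h : ∀ r', rest ≠ '\n' :: r') :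
    ∀ r', rest.take (n + 1) ≠ '\n' :: r' := by
  intro r' heq
  rcases rest with _ | ⟨r0, rest'⟩
  · simp at heq
  · simp only [List.take_succ_cons] at heq
    injection heq with h1 h2
    exact h rest' (by rw [h1])

-- B's prefix line count computes loc over the whole text's line lengths
theorem prefix_loc (cs : List Char) : ∀ (k : Nat), k < cs.length →
    ((splitlinesKeep (cs.take (k + 1))).length : Int) = loc (lineLens cs) (k : Int) := by
  induction cs using splitlinesKeep.induct with
  | case1 => intro k hk; simp at hk
  | case2 rest ih =>
    intro k hk
    rw [lineLens_crlf]
    match k with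
    | 0 =>
      rw [show (('\r'::'\n'::rest).take 1) = ['\r'] from rfl,
        show splitlinesKeep ['\r'] = [['\r']] from rfl]
      norm_num [loc]
    | 1 =>
      rw [show (('\r'::'\n'::rest).take 2) = ['\r', '\n'] from rfl,
        show splitlinesKeep ['\r', '\n'] = [['\r', '\n']] from rfl]
      norm_num [loc]
    | (k + 2) =>
      have hk2 : k < rest.length := by simp at hk; omega
      have hI := ih k hk2
      rw [show (('\r'::'\n'::rest).take (k + 2 + 1)) = '\r'::'\n'::(rest.take (k + 1)) from by
        simp [List.take_succ_cons]]
      rw [slk_crlf, loc_cons_ge 2 _ (((k + 2 : Nat)) : Int) (by push_cast; omega),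
        show (((k + 2 : Nat)) : Int) - (2 : Nat) = ((k : Nat) : Int) from by push_cast; ring]
      rw [List.length_cons]
      push_cast at hI ⊢
      omega
  | case3 rest h ih =>
    intro k hk
    rw [lineLens_cr rest (fun r' he => h r' he)]
    match k with
    | 0 =>
      rw [show (('\r'::rest).take 1) = ['\r'] from rfl,
        show splitlinesKeep ['\r'] = [['\r']] from rfl]
      norm_num [loc]
    | (k + 1) =>
      have hk2 : k < rest.length := by simp at hk; omega
      have hI := ih k hk2
      rw [show (('\r'::rest).take (k + 1 + 1)) = '\r'::(rest.take (k + 1)) from by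
        simp [List.take_succ_cons]]
      rw [slk_cr (rest.take (k + 1)) (take_head_ne rest k (fun r' he => h r' he)),
        loc_cons_ge 1 _ (((k + 1 : Nat)) : Int) (by push_cast; omega),
        show (((k + 1 : Nat)) : Int) - (1 : Nat) = ((k : Nat) : Int) from by push_cast; ring]
      rw [List.length_cons]
      push_cast at hI ⊢
      omega
  | case4 rest ih =>
    intro k hk
    rw [lineLens_lf]
    match k with
    | 0 =>
      rw [show (('\n'::rest).take 1) = ['\n'] from rfl,
        show splitlinesKeep ['\n'] = [['\n']] from rfl]
      norm_num [loc]
    | (k + 1) =>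
      have hk2 : k < rest.length := by simp at hk; omega
      have hI := ih k hk2
      rw [show (('\n'::rest).take (k + 1 + 1)) = '\n'::(rest.take (k + 1)) from by
        simp [List.take_succ_cons]]
      rw [slk_lf, loc_cons_ge 1 _ (((k + 1 : Nat)) : Int) (by push_cast; omega),
        show (((k + 1 : Nat)) : Int) - (1 : Nat) = ((k : Nat) : Int) from by push_cast; ring]
      rw [List.length_cons]
      push_cast at hI ⊢
      omega
  | case5 c rest h1 h2 h3 hnil ih =>
    intro k hk
    have hc : c ≠ '\r' := fun he => h2 he
    have hn : c ≠ '\n' := fun he => h3 he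
    have hrest : rest = [] := (splitlinesKeep_eq_nil rest).mp hnil
    subst hrest
    match k with
    | 0 =>
      rw [show (([c]).take 1) = [c] from rfl,
        show lineLens [c] = [1] from by simp [lineLens, slk_other c [] hc hn, splitlinesKeep],
        slk_other c [] hc hn]
      norm_num [loc, splitlinesKeep]
    | (k + 1) => exact absurd hk (by simp)
  | case6 c rest h1 h2 h3 l ls hcons ih =>
    intro k hk
    have hc : c ≠ '\r' := fun he => h2 he
    have hn : c ≠ '\n' := fun he => h3 he
    rw [lineLens_other c rest hc hn l ls hcons]
    match k with
    | 0 =>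
      have hr : rest ≠ [] := fun he => by rw [he] at hcons; simp [splitlinesKeep] at hcons
      rcases rest with _ | ⟨r0, rest'⟩
      · exact absurd rfl hr
      · rw [show ((c::r0::rest').take 1) = [c] from rfl, slk_other c [] hc hn,
          loc_cons_lt (l.length + 1) _ ((0 : Nat) : Int) (by push_cast; omega)]
        norm_num [splitlinesKeep]
    | (k + 1) =>
      have hk2 : k < rest.length := by simp at hk; omega
      have hI := ih k hk2
      rw [lineLens_tail rest l ls hcons] at hI
      rw [show ((c::rest).take (k + 1 + 1)) = c::(rest.take (k + 1)) from by
        simp [List.take_succ_cons]]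
      have htk : rest.take (k + 1) ≠ [] := by
        have : (rest.take (k + 1)).length = min (k + 1) rest.length := List.length_take ..
        intro he; rw [he] at this; simp at this; omega
      rcases hsp : splitlinesKeep (rest.take (k + 1)) with _ | ⟨l', ls'⟩
      · exact absurd ((splitlinesKeep_eq_nil _).mp hsp) htk
      · rw [show splitlinesKeep (c :: rest.take (k + 1)) = (c::l')::ls' from by
          rw [slk_other c (rest.take (k + 1)) hc hn, hsp]]
        rw [hsp] at hI
        by_cases hlt : ((k : Nat) : Int) < (l.length : Int)
        · rw [loc_cons_lt l.length _ _ hlt] at hI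
          rw [loc_cons_lt (l.length + 1) _ (((k + 1 : Nat)) : Int) (by push_cast at hlt ⊢; omega)]
          simp only [List.length_cons] at hI ⊢
          push_cast at hI ⊢
          omega
        · rw [loc_cons_ge l.length _ _ hlt] at hI
          rw [loc_cons_ge (l.length + 1) _ (((k + 1 : Nat)) : Int) (by push_cast at hlt ⊢; omega),
            show (((k + 1 : Nat)) : Int) - ((l.length + 1 : Nat) : Int) = ((k : Nat) : Int) - (l.length : Int) from by
              push_cast; ring]
          simp only [List.length_cons] at hI ⊢
          push_cast at hI ⊢
          omega

-- proof-side helpers: 1-based line number of the character at position b, and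
-- "a line ends at position j" as a Bool
def dLineOf : List Char → Int → Int
  | [], _ => 1
  | '\r' :: '\n' :: rest, b => if b ≤ 1 then 1 else 1 + dLineOf rest (b - 2)
  | '\r' :: rest, b => if b ≤ 0 then 1 else 1 + dLineOf rest (b - 1)
  | '\n' :: rest, b => if b ≤ 0 then 1 else 1 + dLineOf rest (b - 1)
  | _ :: rest, b => if b ≤ 0 then 1 else dLineOf rest (b - 1)

def isEndB (cs : List Char) (j : Nat) : Bool :=
  cs[j]? == some '\n' || (cs[j]? == some '\r' && !(cs[j + 1]? == some '\n'))

theorem isEndB_iff (cs : List Char) (j : Nat) : isEndB cs j = true ↔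
    (cs[j]? = some '\n' ∨ (cs[j]? = some '\r' ∧ cs[j + 1]? ≠ some '\n')) := by
  simp [isEndB]

theorem isEndB_cons_succ (x : Char) (cs : List Char) (j : Nat) :
    isEndB (x :: cs) (j + 1) = isEndB cs j := by
  simp [isEndB]

-- unfold equations for dLineOf
theorem dl_crlf (rest : List Char) (b : Int) :
    dLineOf ('\r'::'\n'::rest) b = if b ≤ 1 then 1 else 1 + dLineOf rest (b - 2) := rfl
theorem dl_lf (rest : List Char) (b : Int) :
    dLineOf ('\n'::rest) b = if b ≤ 0 then 1 else 1 + dLineOf rest (b - 1) := rfl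
theorem dl_cr (rest : List Char) (b : Int) (h : ∀ r', rest ≠ '\n' :: r') :
    dLineOf ('\r'::rest) b = if b ≤ 0 then 1 else 1 + dLineOf rest (b - 1) := by
  rcases rest with _ | ⟨r0, rest'⟩
  · rfl
  · have hr0 : r0 ≠ '\n' := fun he => h rest' (by rw [he])
    rw [dLineOf.eq_def]
    split
    case h_1 => rename_i heq; simp at heq
    case h_2 => rename_i heq; injection heq with ha hb; injection hb with hb1 hb2; exact absurd hb1 hr0
    case h_3 => rename_i heq; injection heq with ha hb; rw [hb]
    case h_4 => rename_i heq; injection heq with ha hb; simp at ha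
    case h_5 => rename_i hne _ heq; injection heq with ha hb; exact absurd ha.symm (by simpa using hne)
theorem dl_other (c : Char) (rest : List Char) (b : Int) (hc : c ≠ '\r') (hn : c ≠ '\n') :
    dLineOf (c::rest) b = if b ≤ 0 then 1 else dLineOf rest (b - 1) := by
  rw [dLineOf.eq_def]
  split
  case h_1 => rename_i heq; simp at heq
  case h_2 => rename_i heq; injection heq with ha hb; exact absurd ha hc
  case h_3 => rename_i heq; injection heq with ha hb; exact absurd ha hc
  case h_4 => rename_i heq; injection heq with ha hb; exact absurd ha hn
  case h_5 => rename_i heq; injection heq with ha hb; rw [hb]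

-- the D_ helper agrees with loc on in-range positions
theorem dLineOf_loc (cs : List Char) : ∀ (k : Nat), k < cs.length →
    dLineOf cs (k : Int) = loc (lineLens cs) (k : Int) := by
  induction cs using splitlinesKeep.induct with
  | case1 => intro k hk; simp at hk
  | case2 rest ih =>
    intro k hk
    rw [lineLens_crlf, dl_crlf]
    match k with
    | 0 => norm_num [loc]
    | 1 => norm_num [loc]
    | (k + 2) =>
      have hk2 : k < rest.length := by simp at hk; omega
      have hI := ih k hk2
      rw [loc_cons_ge 2 _ (((k + 2 : Nat)) : Int) (by push_cast; omega),
        if_neg (by push_cast; omega : ¬ (((k + 2 : Nat)) : Int) ≤ 1),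
        show (((k + 2 : Nat)) : Int) - 2 = ((k : Nat) : Int) from by push_cast; ring,
        show (((k + 2 : Nat)) : Int) - ((2 : Nat) : Int) = ((k : Nat) : Int) from by push_cast; ring,
        hI]
  | case3 rest h ih =>
    intro k hk
    rw [lineLens_cr rest (fun r' he => h r' he), dl_cr rest _ (fun r' he => h r' he)]
    match k with
    | 0 => norm_num [loc]
    | (k + 1) =>
      have hk2 : k < rest.length := by simp at hk; omega
      have hI := ih k hk2
      rw [loc_cons_ge 1 _ (((k + 1 : Nat)) : Int) (by push_cast; omega),
        if_neg (by push_cast; omega : ¬ (((k + 1 : Nat)) : Int) ≤ 0),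
        show (((k + 1 : Nat)) : Int) - 1 = ((k : Nat) : Int) from by push_cast; ring,
        show (((k + 1 : Nat)) : Int) - ((1 : Nat) : Int) = ((k : Nat) : Int) from by push_cast; ring,
        hI]
  | case4 rest ih =>
    intro k hk
    rw [lineLens_lf, dl_lf]
    match k with
    | 0 => norm_num [loc]
    | (k + 1) =>
      have hk2 : k < rest.length := by simp at hk; omega
      have hI := ih k hk2
      rw [loc_cons_ge 1 _ (((k + 1 : Nat)) : Int) (by push_cast; omega),
        if_neg (by push_cast; omega : ¬ (((k + 1 : Nat)) : Int) ≤ 0),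
        show (((k + 1 : Nat)) : Int) - 1 = ((k : Nat) : Int) from by push_cast; ring,
        show (((k + 1 : Nat)) : Int) - ((1 : Nat) : Int) = ((k : Nat) : Int) from by push_cast; ring,
        hI]
  | case5 c rest h1 h2 h3 hnil ih =>
    intro k hk
    have hc : c ≠ '\r' := fun he => h2 he
    have hn : c ≠ '\n' := fun he => h3 he
    have hrest : rest = [] := (splitlinesKeep_eq_nil rest).mp hnil
    subst hrest
    match k with
    | 0 =>
      rw [show lineLens [c] = [1] from by simp [lineLens, slk_other c [] hc hn, splitlinesKeep],
        dl_other c [] _ hc hn]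
      norm_num [loc]
    | (k + 1) => exact absurd hk (by simp)
  | case6 c rest h1 h2 h3 l ls hcons ih =>
    intro k hk
    have hc : c ≠ '\r' := fun he => h2 he
    have hn : c ≠ '\n' := fun he => h3 he
    rw [lineLens_other c rest hc hn l ls hcons, dl_other c rest _ hc hn]
    match k with
    | 0 => norm_num [loc]
    | (k + 1) =>
      have hk2 : k < rest.length := by simp at hk; omega
      have hI := ih k hk2
      rw [lineLens_tail rest l ls hcons] at hI
      rw [if_neg (by push_cast; omega : ¬ (((k + 1 : Nat)) : Int) ≤ 0),
        show (((k + 1 : Nat)) : Int) - 1 = ((k : Nat) : Int) from by push_cast; ring, hI]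
      by_cases hlt : ((k : Nat) : Int) < (l.length : Int)
      · rw [loc_cons_lt l.length _ _ hlt,
          loc_cons_lt (l.length + 1) _ (((k + 1 : Nat)) : Int) (by push_cast at hlt ⊢; omega)]
      · rw [loc_cons_ge l.length _ _ hlt,
          loc_cons_ge (l.length + 1) _ (((k + 1 : Nat)) : Int) (by push_cast at hlt ⊢; omega),
          show (((k + 1 : Nat)) : Int) - ((l.length + 1 : Nat) : Int) = ((k : Nat) : Int) - (l.length : Int) from by
            push_cast; ring]

-- closed forms of the two ports
theorem take_loc (cs : List Char) (b : Int) (h : 0 ≤ b ∧ b < (cs.length : Int)) :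
    ((splitlinesKeep (cs.take (b + 1).toNat)).length : Int) = loc (lineLens cs) b := by
  have hk : (b + 1).toNat = b.toNat + 1 := by omega
  rw [hk]
  have hp := prefix_loc cs b.toNat (by omega)
  rw [show ((b.toNat : Nat) : Int) = b from by omega] at hp
  exact hp

theorem alt_eq (text : String) (sb eb : Int) :
    byte_to_line_range_alt text sb eb =
      (let S := if 0 ≤ sb ∧ sb < (text.toList.length : Int)
          then loc (lineLens text.toList) sb else 1
       let E := if 0 < eb ∧ eb ≤ (text.toList.length : Int)
          then loc (lineLens text.toList) (eb - 1)
          else max 1 ((lineLens text.toList).length : Int)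
       (S, max S E)) := by
  simp only [byte_to_line_range_alt]
  have hlen : ((splitlinesKeep text.toList).length : Int) = ((lineLens text.toList).length : Int) := by
    simp [lineLens]
  by_cases hS : 0 ≤ sb ∧ sb < (text.toList.length : Int)
  · have hSval : ((splitlinesKeep (PySem.List.slice text.toList none (some (sb + 1)))).length : Int)
        = loc (lineLens text.toList) sb := by
      rw [PySem.List.slice_to _ (by omega)]
      exact take_loc text.toList sb hS
    by_cases hE : 0 < eb ∧ eb ≤ (text.toList.length : Int)
    · have hEval : ((splitlinesKeep (PySem.List.slice text.toList none (some eb))).length : Int)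
          = loc (lineLens text.toList) (eb - 1) := by
        rw [PySem.List.slice_to _ (by omega),
          show eb.toNat = ((eb - 1) + 1).toNat from by omega]
        exact take_loc text.toList (eb - 1) ⟨by omega, by omega⟩
      simp only [if_pos hS, if_pos hE, hSval, hEval]
    · simp only [if_pos hS, if_neg hE, hSval, hlen]
  · by_cases hE : 0 < eb ∧ eb ≤ (text.toList.length : Int)
    · have hEval : ((splitlinesKeep (PySem.List.slice text.toList none (some eb))).length : Int)
          = loc (lineLens text.toList) (eb - 1) := by
        rw [PySem.List.slice_to _ (by omega),
          show eb.toNat = ((eb - 1) + 1).toNat from by omega]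
        exact take_loc text.toList (eb - 1) ⟨by omega, by omega⟩
      simp only [if_neg hS, if_pos hE, hEval]
    · simp only [if_neg hS, if_neg hE, hlen]

theorem a_eq (text : String) (sb eb : Int) :
    byte_to_line_range text sb eb =
      (if 0 < eb ∧ eb ≤ (text.toList.length : Int) then
        (let S := if 0 ≤ sb ∧ sb < (text.toList.length : Int) ∧
              loc (lineLens text.toList) sb ≤ loc (lineLens text.toList) (eb - 1)
            then loc (lineLens text.toList) sb else 1
         (S, max S (loc (lineLens text.toList) (eb - 1))))
      else
        (let S := if 0 ≤ sb ∧ sb < (text.toList.length : Int)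
            then loc (lineLens text.toList) sb else 1
         (S, max S (max 1 ((lineLens text.toList).length : Int))))) := by
  simp only [byte_to_line_range]
  rw [line_offsets_eq, PySem.List.slice_to_neg_one, List.tail_cons,
    zip_dropLast_cums (lineLens text.toList) 0,
    aLoop_spec sb eb (lineLens text.toList) 0 1 1 1 (lineLens_pos _)]
  simp only [sub_zero, zero_add, sum_lineLens]
  have hone : ∀ x : Int, 1 + x - 1 = x := fun x => by ring
  have hcl : ((0 :: cums 0 (lineLens text.toList)).length : Int) - 1
      = ((lineLens text.toList).length : Int) := by
    simp [cums_length]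
  by_cases hE : 0 < eb ∧ eb ≤ (text.toList.length : Int)
  · simp only [if_pos hE, hone, if_true]
  · simp only [if_neg hE, hone, lt_irrefl, false_and, and_false, if_false,
      Bool.false_eq_true, hcl, if_neg (List.cons_ne_nil 0 (cums 0 (lineLens text.toList)))]

theorem dor_loc_sb (cs : List Char) (sb : Int) (h : 0 ≤ sb ∧ sb < (cs.length : Int)) :
    dLineOf cs sb = loc (lineLens cs) sb := by
  have hk : sb = ((sb.toNat : Nat) : Int) := by omega
  rw [hk]
  exact dLineOf_loc cs sb.toNat (by omega)

theorem dLineOf_nonpos (cs : List Char) (b : Int) (h : b ≤ 0) : dLineOf cs b = 1 := by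
  rw [dLineOf.eq_def]
  split <;> first | rfl | (rw [if_pos (by omega)])

theorem dLineOf_step (cs : List Char) : ∀ (k : Nat), k + 1 < cs.length →
    dLineOf cs ((k + 1 : Nat) : Int) = dLineOf cs (k : Int) + (if isEndB cs k then 1 else 0) := by
  induction cs using splitlinesKeep.induct with
  | case1 => intro k hk; simp at hk
  | case2 rest ih =>
    intro k hk
    match k with
    | 0 =>
      have hend : isEndB ('\r'::'\n'::rest) 0 = false := by simp [isEndB]
      rw [hend, dl_crlf, dl_crlf]
      norm_num
    | 1 =>
      have hend : isEndB ('\r'::'\n'::rest) 1 = true := by simp [isEndB]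
      rw [hend, dl_crlf, dl_crlf, dLineOf_nonpos rest (((2 : Nat) : Int) - 2) (by norm_num)]
      norm_num
    | (k + 2) =>
      have hk2 : k + 1 < rest.length := by simp at hk; omega
      have hI := ih k hk2
      rw [dl_crlf, dl_crlf, if_neg (by push_cast; omega : ¬ (((k + 2 + 1 : Nat)) : Int) ≤ 1),
        if_neg (by push_cast; omega : ¬ (((k + 2 : Nat)) : Int) ≤ 1),
        show (((k + 2 + 1 : Nat)) : Int) - 2 = (((k + 1 : Nat)) : Int) from by push_cast; ring,
        show (((k + 2 : Nat)) : Int) - 2 = ((k : Nat) : Int) from by push_cast; ring,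
        show isEndB ('\r'::'\n'::rest) (k + 2) = isEndB rest k from by
          rw [show k + 2 = (k + 1) + 1 from rfl, isEndB_cons_succ, isEndB_cons_succ],
        hI]
      ring
  | case3 rest h ih =>
    intro k hk
    have hrw : ∀ b, dLineOf ('\r'::rest) b = if b ≤ 0 then 1 else 1 + dLineOf rest (b - 1) :=
      fun b => dl_cr rest b (fun r' he => h r' he)
    match k with
    | 0 =>
      rcases rest with _ | ⟨r0, rest'⟩
      · simp at hk
      · have hr0 : r0 ≠ '\n' := fun he => h rest' (by rw [he])
        have hend : isEndB ('\r'::r0::rest') 0 = true := by simp [isEndB, hr0]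
        rw [hend, hrw, hrw, dLineOf_nonpos (r0::rest') (((1 : Nat) : Int) - 1) (by norm_num)]
        norm_num
    | (k + 1) =>
      have hk2 : k + 1 < rest.length := by simp at hk; omega
      have hI := ih k hk2
      rw [hrw, hrw, if_neg (by push_cast; omega : ¬ (((k + 1 + 1 : Nat)) : Int) ≤ 0),
        if_neg (by push_cast; omega : ¬ (((k + 1 : Nat)) : Int) ≤ 0),
        show (((k + 1 + 1 : Nat)) : Int) - 1 = (((k + 1 : Nat)) : Int) from by push_cast; ring,
        show (((k + 1 : Nat)) : Int) - 1 = ((k : Nat) : Int) from by push_cast; ring,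
        isEndB_cons_succ, hI]
      ring
  | case4 rest ih =>
    intro k hk
    match k with
    | 0 =>
      have hend : isEndB ('\n'::rest) 0 = true := by simp [isEndB]
      rw [hend, dl_lf, dl_lf, dLineOf_nonpos rest (((1 : Nat) : Int) - 1) (by norm_num)]
      norm_num
    | (k + 1) =>
      have hk2 : k + 1 < rest.length := by simp at hk; omega
      have hI := ih k hk2
      rw [dl_lf, dl_lf, if_neg (by push_cast; omega : ¬ (((k + 1 + 1 : Nat)) : Int) ≤ 0),
        if_neg (by push_cast; omega : ¬ (((k + 1 : Nat)) : Int) ≤ 0),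
        show (((k + 1 + 1 : Nat)) : Int) - 1 = (((k + 1 : Nat)) : Int) from by push_cast; ring,
        show (((k + 1 : Nat)) : Int) - 1 = ((k : Nat) : Int) from by push_cast; ring,
        isEndB_cons_succ, hI]
      ring
  | case5 c rest h1 h2 h3 hnil ih =>
    intro k hk
    have hrest : rest = [] := (splitlinesKeep_eq_nil rest).mp hnil
    subst hrest
    simp at hk
  | case6 c rest h1 h2 h3 l ls hcons ih =>
    intro k hk
    have hc : c ≠ '\r' := fun he => h2 he
    have hn : c ≠ '\n' := fun he => h3 he
    match k with
    | 0 =>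
      have hend : isEndB (c::rest) 0 = false := by simp [isEndB, hc, hn]
      rw [hend, dl_other c rest _ hc hn, dl_other c rest _ hc hn,
        dLineOf_nonpos rest (((1 : Nat) : Int) - 1) (by norm_num)]
      norm_num
    | (k + 1) =>
      have hk2 : k + 1 < rest.length := by simp at hk; omega
      have hI := ih k hk2
      rw [dl_other c rest _ hc hn, dl_other c rest _ hc hn,
        if_neg (by push_cast; omega : ¬ (((k + 1 + 1 : Nat)) : Int) ≤ 0),
        if_neg (by push_cast; omega : ¬ (((k + 1 : Nat)) : Int) ≤ 0),
        show (((k + 1 + 1 : Nat)) : Int) - 1 = (((k + 1 : Nat)) : Int) from by push_cast; ring,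
        show (((k + 1 : Nat)) : Int) - 1 = ((k : Nat) : Int) from by push_cast; ring,
        isEndB_cons_succ, hI]

theorem dLineOf_mono (cs : List Char) (k1 : Nat) : ∀ (k2 : Nat), k1 ≤ k2 → k2 < cs.length →
    dLineOf cs (k1 : Int) ≤ dLineOf cs (k2 : Int) := by
  intro k2
  induction k2 with
  | zero =>
    intro h12 h2
    have hk : k1 = 0 := by omega
    subst hk
    omega
  | succ n ihn =>
    intro h12 h2
    rcases Nat.lt_or_ge k1 (n + 1) with hlt | hge
    · have := ihn (by omega) (by omega)
      rw [dLineOf_step cs n h2]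
      split_ifs <;> omega
    · have hk : k1 = n + 1 := by omega
      subst hk
      omega

theorem dLineOf_lt_iff (cs : List Char) (k1 : Nat) : ∀ (k2 : Nat), k1 ≤ k2 → k2 < cs.length →
    (dLineOf cs (k1 : Int) < dLineOf cs (k2 : Int) ↔
      ∃ j, j < k2 ∧ k1 ≤ j ∧ isEndB cs j = true) := by
  intro k2
  induction k2 with
  | zero =>
    intro h12 h2
    have hk : k1 = 0 := by omega
    subst hk
    simp
  | succ n ihn =>
    intro h12 h2
    rcases Nat.lt_or_ge k1 (n + 1) with hlt | hge
    · rw [dLineOf_step cs n h2]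
      have hmono := dLineOf_mono cs k1 n (by omega) (by omega)
      have hIH := ihn (by omega) (by omega)
      by_cases he : isEndB cs n
      · rw [if_pos he]
        constructor
        · intro _; exact ⟨n, by omega, by omega, he⟩
        · intro _; omega
      · rw [if_neg he]
        constructor
        · intro hlt2
          obtain ⟨j, hj1, hj2, hj3⟩ := hIH.mp (by omega)
          exact ⟨j, by omega, hj2, hj3⟩
        · rintro ⟨j, hj1, hj2, hj3⟩
          have : j ≠ n := fun hje => by rw [hje] at hj3; exact absurd hj3 (by simpa using he)
          have := hIH.mpr ⟨j, by omega, hj2, hj3⟩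
          omega
    · have hk : k1 = n + 1 := by omega
      subst hk
      constructor
      · omega
      · rintro ⟨j, hj1, hj2, _⟩; omega

-- D_ expressed through loc (on in-range endpoints)
theorem D_bridge (text : String) (sb eb : Int)
    (hS : 0 ≤ sb ∧ sb < (text.toList.length : Int))
    (hE : 0 < eb ∧ eb ≤ (text.toList.length : Int)) :
    D_byte_to_line_range text sb eb ↔
      loc (lineLens text.toList) (eb - 1) < loc (lineLens text.toList) sb := by
  unfold D_byte_to_line_range
  rw [← dor_loc_sb text.toList sb hS, ← dor_loc_sb text.toList (eb - 1) ⟨by omega, by omega⟩]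
  rcases Nat.lt_or_ge sb.toNat (eb - 1).toNat with hgt | hle
  · -- start strictly before end_byte-1: both sides false
    have hmono := dLineOf_mono text.toList sb.toNat (eb - 1).toNat (by omega) (by omega)
    rw [Int.toNat_of_nonneg (show (0 : Int) ≤ sb from by omega),
        Int.toNat_of_nonneg (show (0 : Int) ≤ eb - 1 from by omega)] at hmono
    constructor
    · rintro ⟨_, _, _, _, j, hj1, hj2, _⟩; omega
    · intro h; omega
  · have hiff := dLineOf_lt_iff text.toList (eb - 1).toNat sb.toNat hle (by omega)
    rw [Int.toNat_of_nonneg (show (0 : Int) ≤ eb - 1 from by omega),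
        Int.toNat_of_nonneg (show (0 : Int) ≤ sb from by omega)] at hiff
    rw [hiff]
    constructor
    · rintro ⟨_, _, _, _, j, hj1, hj2, hj3⟩
      exact ⟨j, hj1, by omega, (isEndB_iff _ _).mpr hj3⟩
    · rintro ⟨j, hj1, hj2, hj3⟩
      exact ⟨hS.1, hS.2, hE.1, hE.2, j, hj1, by omega, (isEndB_iff _ _).mp hj3⟩

-- ===== VERDICT (by name: the statement is the Claim_ definition above) =====
theorem byte_to_line_range_spec : Claim_unchanged_byte_to_line_range := by
  intro text sb eb _ hnD
  rw [a_eq, alt_eq]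
  by_cases hE : 0 < eb ∧ eb ≤ (text.toList.length : Int)
  · by_cases hS : 0 ≤ sb ∧ sb < (text.toList.length : Int)
    · have hd : loc (lineLens text.toList) sb ≤ loc (lineLens text.toList) (eb - 1) := by
        by_contra hlt
        exact hnD ((D_bridge text sb eb hS hE).mpr (by omega))
      have h3 : 0 ≤ sb ∧ sb < (text.toList.length : Int) ∧
          loc (lineLens text.toList) sb ≤ loc (lineLens text.toList) (eb - 1) :=
        ⟨hS.1, hS.2, hd⟩
      simp only [if_pos hE, if_pos hS, if_pos h3]
    · have h3 : ¬(0 ≤ sb ∧ sb < (text.toList.length : Int) ∧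
          loc (lineLens text.toList) sb ≤ loc (lineLens text.toList) (eb - 1)) :=
        fun h => hS ⟨h.1, h.2.1⟩
      simp only [if_pos hE, if_neg hS, if_neg h3]
  · simp only [if_neg hE]

theorem byte_to_line_range_changed : Claim_changed_byte_to_line_range := by
  unfold Claim_changed_byte_to_line_range; decide

theorem byte_to_line_range_tight : Claim_exact_byte_to_line_range := by
  intro text sb eb _ hD
  have hS : 0 ≤ sb ∧ sb < (text.toList.length : Int) := ⟨hD.1, hD.2.1⟩
  have hE : 0 < eb ∧ eb ≤ (text.toList.length : Int) := ⟨hD.2.2.1, hD.2.2.2.1⟩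
  have h5 := (D_bridge text sb eb hS hE).mp hD
  rw [a_eq, alt_eq]
  have hls := loc_pos (lineLens text.toList) (eb - 1)
  have hC : ¬(0 ≤ sb ∧ sb < (text.toList.length : Int) ∧
      loc (lineLens text.toList) sb ≤ loc (lineLens text.toList) (eb - 1)) :=
    fun h => absurd h.2.2 (by omega)
  simp only [if_pos hE, if_pos hS, if_neg hC]
  intro hcon
  have := congrArg Prod.fst hcon
  simp only at this
  omega
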